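-- pv_equiv track=rewrite | github.com/ColorC/toyshop | toyshop/tdd_pipeline.py | _parse_spec_scenarios
-- ===== SOURCE A (Python) =====
-- def _parse_spec_scenarios(spec_md: str) -> list[dict[str, str]]:
--     """Parse Given/When/Then scenarios from spec.md."""
--     scenarios: list[dict[str, str]] = []
--     lines = spec_md.split("\n")
--     current: dict[str, str] = {}
--
--     for line in lines:
--         stripped = line.strip()
--         # Match "## TC-001: Name"
--         if stripped.startswith("## "):
--             if current:
--                 scenarios.append(current)
--             header = stripped[3:].strip()
--             parts = header.split(":", 1)
--             current = {
--                 "id": parts[0].strip(),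
--                 "name": parts[1].strip() if len(parts) > 1 else header,
--                 "given": "",
--                 "when": "",
--                 "then": "",
--             }
--         elif stripped.startswith("**Given:**"):
--             if current:
--                 current["given"] = stripped.replace("**Given:**", "").strip()
--         elif stripped.startswith("**When:**"):
--             if current:
--                 current["when"] = stripped.replace("**When:**", "").strip()
--         elif stripped.startswith("**Then:**"):
--             if current:
--                 current["then"] = stripped.replace("**Then:**", "").strip()
--
--     if current:
--         scenarios.append(current)
--
--     return scenarios
-- ===== SOURCE B (Python) =====
-- def _parse_spec_scenarios(spec_md: str) -> list[dict[str, str]]: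
--     """Parse Given/When/Then scenarios from spec.md (block-segmentation version)."""
--     stripped = [ln.strip() for ln in spec_md.split("\n")]
--     scenarios = []
--     i, n = 0, len(stripped)
--     while i < n:
--         if not stripped[i].startswith("## "):
--             i += 1
--             continue
--         j = i + 1
--         while j < n and not stripped[j].startswith("## "):
--             j += 1
--         scenarios.append(_scenario(stripped[i], stripped[i + 1:j]))
--         i = j
--     return scenarios
--
--
-- def _scenario(header_line: str, body: list[str]) -> dict[str, str]:
--     header = header_line[3:].strip()
--     parts = header.split(":", 1)
--     return {
--         "id": parts[0].strip(),
--         "name": parts[1].strip() if len(parts) > 1 else header,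
--         "given": _field(body, "**Given:**"),
--         "when": _field(body, "**When:**"),
--         "then": _field(body, "**Then:**"),
--     }
--
--
-- def _field(body: list[str], tag: str) -> str:
--     # last matching line wins, so scan backwards and take the first hit
--     for s in reversed(body):
--         if s.startswith(tag):
--             return s.replace(tag, "").strip()
--     return ""
-- ===== Notes on version B (the rewrite author's own statement) =====
-- stated objective: alternative
-- what changed: Replaces A's single streaming fold that mutates its running scenario dict field by field with a two-phase decomposition: strip all lines once, segment the document into header-delimited blocks, and build each scenario functionally, extracting each Given/When/Then field by a backwards scan that takes the first (i.e. last-wins) matching line.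
import Mathlib
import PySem

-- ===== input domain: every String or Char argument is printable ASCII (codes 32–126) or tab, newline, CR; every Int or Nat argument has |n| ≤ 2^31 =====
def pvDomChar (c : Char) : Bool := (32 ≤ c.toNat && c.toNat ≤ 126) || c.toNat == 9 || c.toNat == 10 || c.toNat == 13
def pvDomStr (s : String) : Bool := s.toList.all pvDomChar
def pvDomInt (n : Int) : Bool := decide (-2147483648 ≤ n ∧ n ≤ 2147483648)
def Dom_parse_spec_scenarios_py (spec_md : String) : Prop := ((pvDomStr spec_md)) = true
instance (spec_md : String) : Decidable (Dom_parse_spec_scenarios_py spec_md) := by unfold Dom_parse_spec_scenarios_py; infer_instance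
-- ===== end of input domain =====

-- B replaces A's streaming fold over a mutable scenario dict by block segmentation plus
-- last-wins backwards field scans; same result, same cost (objective: alternative).

-- ===== PORT A =====

-- dict assignment current[k] = v for a dict that already has key k (overwrite in place)
def pvSetK (d : List (String × String)) (k v : String) : List (String × String) :=
  d.map (fun p => if p.1 == k then (p.1, v) else p)

-- the dict A builds at a "## " header line (argument is the stripped line)
def pvHeaderCur (stripped : String) : List (String × String) :=
  let header := PySem.Str.strip (PySem.Str.slice stripped (some 3) none)
  let parts := (PySem.Str.splitMax? header ":" 1).getD [header]  -- ":" ≠ "", so never none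
  [("id", PySem.Str.strip (parts.headD "")),  -- parts[0]; split is never empty
   ("name", if 1 < parts.length then PySem.Str.strip (parts.getD 1 "") else header),
   ("given", ""), ("when", ""), ("then", "")]

-- A's loop body on the already-stripped line
def pvStepCore (st : List (List (String × String)) × List (String × String)) (stripped : String) :
    List (List (String × String)) × List (String × String) :=
  if PySem.Str.startswith stripped "## " then
    ((if st.2.isEmpty then st.1 else st.1 ++ [st.2]), pvHeaderCur stripped)
  else if PySem.Str.startswith stripped "**Given:**" then
    (if st.2.isEmpty then st
     else (st.1, pvSetK st.2 "given" (PySem.Str.strip (PySem.Str.replace stripped "**Given:**" ""))))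
  else if PySem.Str.startswith stripped "**When:**" then
    (if st.2.isEmpty then st
     else (st.1, pvSetK st.2 "when" (PySem.Str.strip (PySem.Str.replace stripped "**When:**" ""))))
  else if PySem.Str.startswith stripped "**Then:**" then
    (if st.2.isEmpty then st
     else (st.1, pvSetK st.2 "then" (PySem.Str.strip (PySem.Str.replace stripped "**Then:**" ""))))
  else st

def pvStepA (st : List (List (String × String)) × List (String × String)) (line : String) :
    List (List (String × String)) × List (String × String) :=
  pvStepCore st (PySem.Str.strip line)  -- stripped = line.strip()

def parse_spec_scenarios_py (spec_md : String) : List (List (String × String)) :=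
  let st := ((PySem.Str.split? spec_md "\n").getD []).foldl pvStepA ([], [])  -- "\n" ≠ "", so split? is never none
  if st.2.isEmpty then st.1 else st.1 ++ [st.2]

-- ===== PORT B =====

def pvIsHeader (s : String) : Bool := PySem.Str.startswith s "## "

-- _field: scan backwards, first hit wins
def pvFieldGo (tag : String) : List String → String
  | [] => ""
  | s :: rest =>
    if PySem.Str.startswith s tag then PySem.Str.strip (PySem.Str.replace s tag "")
    else pvFieldGo tag rest

def pvField (body : List String) (tag : String) : String := pvFieldGo tag body.reverse

-- _scenario
def pvScenario (headerLine : String) (body : List String) : List (String × String) :=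
  let header := PySem.Str.strip (PySem.Str.slice headerLine (some 3) none)
  let parts := (PySem.Str.splitMax? header ":" 1).getD [header]  -- ":" ≠ "", so never none
  [("id", PySem.Str.strip (parts.headD "")),
   ("name", if 1 < parts.length then PySem.Str.strip (parts.getD 1 "") else header),
   ("given", pvField body "**Given:**"),
   ("when", pvField body "**When:**"),
   ("then", pvField body "**Then:**")]

-- the index loops over the (already stripped) lines: skip to a header, cut its block, recurse
def pvBlocks : List String → List (List (String × String))
  | [] => []
  | s :: rest =>
    if pvIsHeader s then
      pvScenario s (rest.takeWhile (fun t => !pvIsHeader t))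
        :: pvBlocks (rest.dropWhile (fun t => !pvIsHeader t))
    else pvBlocks rest
termination_by l => l.length
decreasing_by
  · simp only [List.length_cons]
    exact Nat.lt_succ_of_le (List.length_dropWhile_le _ _)
  · simp

def parse_spec_scenarios_py_alt (spec_md : String) : List (List (String × String)) :=
  pvBlocks (((PySem.Str.split? spec_md "\n").getD []).map PySem.Str.strip)  -- "\n" ≠ "", so split? is never none

-- ===== PRECONDITION & SPEC =====
def Spec_parse_spec_scenarios_py (spec_md : String) (out : List (List (String × String))) : Prop := out = parse_spec_scenarios_py_alt spec_md
instance (spec_md : String) (out : List (List (String × String))) : Decidable (Spec_parse_spec_scenarios_py spec_md out) := by unfold Spec_parse_spec_scenarios_py; infer_instance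

-- ===== CLAIM (what is proved, stated in full; the proofs are below) =====
def Claim_equal_parse_spec_scenarios_py : Prop := ∀ (spec_md : String), Dom_parse_spec_scenarios_py spec_md → Spec_parse_spec_scenarios_py spec_md (parse_spec_scenarios_py spec_md)

-- ===== LEMMAS AND PROOFS =====

-- the forward, accumulator version of a field (what A's overwrites compute)
def pvUpd (v : String) (body : List String) (tag : String) : String :=
  body.foldl (fun acc s =>
    if PySem.Str.startswith s tag then PySem.Str.strip (PySem.Str.replace s tag "") else acc) v

-- finishing step of A
def pvFinish (st : List (List (String × String)) × List (String × String)) : List (List (String × String)) :=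
  if st.2.isEmpty then st.1 else st.1 ++ [st.2]

theorem pvUpd_nil (v tag : String) : pvUpd v [] tag = v := rfl

theorem pvUpd_cons (v s tag : String) (body : List String) :
    pvUpd v (s :: body) tag =
      pvUpd (if PySem.Str.startswith s tag then PySem.Str.strip (PySem.Str.replace s tag "") else v)
        body tag := rfl

theorem pvField_eq_pvUpd (body : List String) (tag : String) :
    pvField body tag = pvUpd "" body tag := by
  induction body using List.reverseRecOn with
  | nil => rfl
  | append_singleton body s ih =>
    simp only [pvField, List.reverse_append, List.reverse_cons, List.reverse_nil,
      List.nil_append, List.cons_append, pvFieldGo, pvUpd, List.foldl_append, List.foldl_cons,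
      List.foldl_nil]
    by_cases h : PySem.Chars.startswith s.toList tag.toList = true
    · simp [h]
    · simp only [Bool.not_eq_true] at h
      simp [h]
      exact ih

-- two of the four sentinels cannot both be prefixes of the same line
theorem pv_prefix_excl {s : String} (p q : String)
    (h1 : ¬ q.toList <+: p.toList) (h2 : ¬ p.toList <+: q.toList)
    (hp : PySem.Str.startswith s p = true) : PySem.Str.startswith s q = false := by
  rw [PySem.Str.startswith_eq] at hp ⊢
  rw [PySem.Chars.startswith_iff] at hp
  rw [Bool.eq_false_iff, Ne, PySem.Chars.startswith_iff]
  intro hq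
  rcases List.prefix_or_prefix_of_prefix hp hq with h | h
  · exact h2 h
  · exact h1 h

-- dict overwrites on the 5-key current dict
theorem pvSetK_given (i n g w t v : String) :
    pvSetK [("id",i),("name",n),("given",g),("when",w),("then",t)] "given" v
      = [("id",i),("name",n),("given",v),("when",w),("then",t)] := by
  simp [pvSetK]

theorem pvSetK_when (i n g w t v : String) :
    pvSetK [("id",i),("name",n),("given",g),("when",w),("then",t)] "when" v
      = [("id",i),("name",n),("given",g),("when",v),("then",t)] := by
  simp [pvSetK]

theorem pvSetK_then (i n g w t v : String) :
    pvSetK [("id",i),("name",n),("given",g),("when",w),("then",t)] "then" v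
      = [("id",i),("name",n),("given",g),("when",w),("then",v)] := by
  simp [pvSetK]

-- one unfolding step of pvBlocks at a header line
theorem pvBlocks_cons_header {s : String} (rest : List String) (hH : pvIsHeader s = true) :
    pvBlocks (s :: rest) = pvScenario s (rest.takeWhile (fun x => !pvIsHeader x))
      :: pvBlocks (rest.dropWhile (fun x => !pvIsHeader x)) := by
  rw [pvBlocks]
  simp [hH]

theorem pvBlocks_cons_skip {s : String} (rest : List String) (hH : pvIsHeader s = false) :
    pvBlocks (s :: rest) = pvBlocks rest := by
  rw [pvBlocks]
  simp [hH]

-- main invariant, current = a freshly created / partially updated 5-key dict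
theorem pv_lemma2 (L : List String) (acc : List (List (String × String))) (i n g w t : String) :
    pvFinish (L.foldl pvStepCore (acc, [("id", i), ("name", n), ("given", g), ("when", w), ("then", t)])) =
      acc ++ [[("id", i), ("name", n),
        ("given", pvUpd g (L.takeWhile (fun x => !pvIsHeader x)) "**Given:**"),
        ("when", pvUpd w (L.takeWhile (fun x => !pvIsHeader x)) "**When:**"),
        ("then", pvUpd t (L.takeWhile (fun x => !pvIsHeader x)) "**Then:**")]]
      ++ pvBlocks (L.dropWhile (fun x => !pvIsHeader x)) := by
  induction L generalizing acc i n g w t with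
  | nil => simp [pvFinish, pvUpd, pvBlocks]
  | cons s rest ih =>
    simp only [List.foldl_cons]
    by_cases hH : PySem.Str.startswith s "## " = true
    · have hH' : pvIsHeader s = true := hH
      simp at hH
      rw [show pvStepCore (acc, [("id",i),("name",n),("given",g),("when",w),("then",t)]) s
            = (acc ++ [[("id",i),("name",n),("given",g),("when",w),("then",t)]], pvHeaderCur s) from by
            simp [pvStepCore, hH]]
      simp only [pvHeaderCur]
      rw [ih]
      simp [pvBlocks_cons_header rest hH', pvScenario, pvField_eq_pvUpd, hH', pvUpd_nil]
    · have hH' : pvIsHeader s = false := by simp [pvIsHeader]; simpa using hH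
      simp at hH
      by_cases hG : PySem.Str.startswith s "**Given:**" = true
      · have hW := pv_prefix_excl "**Given:**" "**When:**" (by decide) (by decide) hG
        have hT := pv_prefix_excl "**Given:**" "**Then:**" (by decide) (by decide) hG
        simp at hG hW hT
        rw [show pvStepCore (acc, [("id",i),("name",n),("given",g),("when",w),("then",t)]) s
              = (acc, [("id",i),("name",n),
                  ("given", PySem.Str.strip (PySem.Str.replace s "**Given:**" "")),
                  ("when",w),("then",t)]) from by
              simp [pvStepCore, hH, hG, pvSetK_given]]
        rw [ih]
        simp [hH', pvUpd_cons, hG, hW, hT]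
      · simp at hG
        by_cases hW : PySem.Str.startswith s "**When:**" = true
        · have hT := pv_prefix_excl "**When:**" "**Then:**" (by decide) (by decide) hW
          simp at hW hT
          rw [show pvStepCore (acc, [("id",i),("name",n),("given",g),("when",w),("then",t)]) s
                = (acc, [("id",i),("name",n),("given",g),
                    ("when", PySem.Str.strip (PySem.Str.replace s "**When:**" "")),
                    ("then",t)]) from by
                simp [pvStepCore, hH, hG, hW, pvSetK_when]]
          rw [ih]
          simp [hH', pvUpd_cons, hG, hW, hT]
        · simp at hW
          by_cases hT : PySem.Str.startswith s "**Then:**" = true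
          · simp at hT
            rw [show pvStepCore (acc, [("id",i),("name",n),("given",g),("when",w),("then",t)]) s
                  = (acc, [("id",i),("name",n),("given",g),("when",w),
                      ("then", PySem.Str.strip (PySem.Str.replace s "**Then:**" ""))]) from by
                  simp [pvStepCore, hH, hG, hW, hT, pvSetK_then]]
            rw [ih]
            simp [hH', pvUpd_cons, hG, hW, hT]
          · simp at hT
            rw [show pvStepCore (acc, [("id",i),("name",n),("given",g),("when",w),("then",t)]) s
                  = (acc, [("id",i),("name",n),("given",g),("when",w),("then",t)]) from by
                  simp [pvStepCore, hH, hG, hW, hT]]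
            rw [ih]
            simp [hH', pvUpd_cons, hG, hW, hT]

-- before the first header
theorem pv_lemma1 (L : List String) (acc : List (List (String × String))) :
    pvFinish (L.foldl pvStepCore (acc, [])) = acc ++ pvBlocks L := by
  induction L generalizing acc with
  | nil => simp [pvFinish, pvBlocks]
  | cons s rest ih =>
    simp only [List.foldl_cons]
    by_cases hH : PySem.Str.startswith s "## " = true
    · have hH' : pvIsHeader s = true := hH
      simp at hH
      rw [show pvStepCore (acc, ([] : List (String × String))) s = (acc, pvHeaderCur s) from by
            simp [pvStepCore, hH]]
      simp only [pvHeaderCur]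
      rw [pv_lemma2]
      simp [pvBlocks_cons_header rest hH', pvScenario, pvField_eq_pvUpd]
    · have hH' : pvIsHeader s = false := by simp [pvIsHeader]; simpa using hH
      simp at hH
      rw [show pvStepCore (acc, ([] : List (String × String))) s = (acc, []) from by
            simp [pvStepCore, hH]]
      rw [ih, pvBlocks_cons_skip rest hH']

-- ===== VERDICT (by name: the statement is the Claim_ definition above) =====
theorem parse_spec_scenarios_py_spec : Claim_equal_parse_spec_scenarios_py := by
  intro spec_md _
  unfold Spec_parse_spec_scenarios_py parse_spec_scenarios_py parse_spec_scenarios_py_alt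
  have h := pv_lemma1 (((PySem.Str.split? spec_md "\n").getD []).map PySem.Str.strip) []
  rw [List.foldl_map] at h
  simpa [pvFinish, pvStepA] using h
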